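-- pv_equiv track=rewrite | github.com/yiyabo/Gram-_Database | TransformerAE.py | tokenize_sequences
-- ===== SOURCE A (Python) =====
-- def tokenize_sequences(seq_list, k, overlap):
--     """k-mer tokenization with shared dict"""
--     tok_dict, tok_seqs = {}, []
--     step = k - overlap # Calculate step size based on k and overlap
--     if step <= 0:
--         raise ValueError(f"Overlap ({overlap}) must be less than k ({k}) for tokenization step size.")
--
--     for seq in seq_list:
--         toks=[]
--         # Iterate through sequence with specified step size
--         for i in range(0, len(seq) - k + 1, step):
--             seg = seq[i:i+k]
--             if seg not in tok_dict:
--                 # Assign new ID if k-mer is new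
--                 tok_dict[seg] = len(tok_dict)+1 # Start IDs from 1 (0 is pad)
--             toks.append(tok_dict[seg])
--         tok_seqs.append(toks)
--     return tok_seqs, tok_dict
-- ===== SOURCE B (Python) =====
-- def _kmers(seq, k, step):
--     """All step-strided k-mer slices of seq, in order."""
--     return [seq[i:i + k] for i in range(0, len(seq) - k + 1, step)]
--
-- def tokenize_sequences(seq_list, k, overlap):
--     """k-mer tokenization with shared dict: fit the vocabulary, then encode."""
--     step = k - overlap
--     if step <= 0:
--         raise ValueError(f"Overlap ({overlap}) must be less than k ({k}) for tokenization step size.")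
--     # Phase 1 (fit): build the id vocabulary in first-appearance order.
--     tok_dict = {}
--     for seq in seq_list:
--         for seg in _kmers(seq, k, step):
--             if seg not in tok_dict:
--                 tok_dict[seg] = len(tok_dict) + 1
--     # Phase 2 (transform): encode every sequence against the finished vocabulary.
--     tok_seqs = [[tok_dict[seg] for seg in _kmers(seq, k, step)] for seq in seq_list]
--     return tok_seqs, tok_dict
-- ===== Notes on version B (the rewrite author's own statement) =====
-- stated objective: idiomatic
-- what changed: A's single fused pass that interleaves vocabulary building with encoding is split into a fit/transform pair: one pass populates the shared k-mer id dictionary, then each sequence is encoded by pure lookups against the finished vocabulary; ids never change after assignment, so the outputs coincide.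
import Mathlib
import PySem

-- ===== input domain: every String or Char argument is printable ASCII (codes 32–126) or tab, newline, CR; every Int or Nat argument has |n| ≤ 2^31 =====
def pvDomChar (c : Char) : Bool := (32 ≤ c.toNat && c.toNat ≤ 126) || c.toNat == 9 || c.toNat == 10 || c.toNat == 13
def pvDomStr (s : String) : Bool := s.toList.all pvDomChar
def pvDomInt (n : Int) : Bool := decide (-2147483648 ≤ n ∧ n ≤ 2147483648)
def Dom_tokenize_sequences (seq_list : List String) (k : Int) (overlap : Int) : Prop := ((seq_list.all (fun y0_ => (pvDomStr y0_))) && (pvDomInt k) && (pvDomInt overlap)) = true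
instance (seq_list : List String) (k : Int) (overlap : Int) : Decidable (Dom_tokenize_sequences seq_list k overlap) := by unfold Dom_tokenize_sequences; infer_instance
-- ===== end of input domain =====

-- B replaces A's fused build-and-encode pass by a fit/transform pair (build the k-mer vocabulary first,
-- then encode by lookup); same return value, stated for step = k - overlap > 0 (A raises ValueError otherwise).


-- ===== PORT A =====
-- literal transliteration of A: one fused pass, state = (tok_dict, tok_seqs); inner loop state = (tok_dict, toks)
def tokenize_sequences (seq_list : List String) (k : Int) (overlap : Int) : List (List Int) × (List (String × Int)) :=
  let step := k - overlap
  -- 'if step <= 0: raise ValueError(...)' — excluded by Pre_tokenize_sequences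
  let res := seq_list.foldl
    (fun (st : PySem.Dict String Int × List (List Int)) seq =>
      let inner := (PySem.List.pyRange 0 (PySem.Str.len seq - k + 1) step).foldl
        (fun (st2 : PySem.Dict String Int × List Int) i =>
          let seg := PySem.Str.slice seq (some i) (some (i + k))
          let d := if st2.1.contains seg then st2.1 else st2.1.insert seg ((st2.1.size : Int) + 1)
          (d, st2.2 ++ [d.getD seg 0]))
        (st.1, [])
      (inner.1, st.2 ++ [inner.2]))
    (PySem.Dict.empty, [])
  (res.2, res.1.items)

-- ===== PORT B =====
-- B's helper _kmers: the step-strided k-mer slices of one sequence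
def pvKmers (seq : String) (k : Int) (step : Int) : List String :=
  (PySem.List.pyRange 0 (PySem.Str.len seq - k + 1) step).map
    (fun i => PySem.Str.slice seq (some i) (some (i + k)))

-- one fit step: assign the next id to an unseen segment
def pvFitSeg (d : PySem.Dict String Int) (seg : String) : PySem.Dict String Int :=
  if d.contains seg then d else d.insert seg ((d.size : Int) + 1)

def tokenize_sequences_alt (seq_list : List String) (k : Int) (overlap : Int) : List (List Int) × (List (String × Int)) :=
  let step := k - overlap
  -- phase 1 (fit): vocabulary in first-appearance order
  let tok_dict := seq_list.foldl (fun d seq => (pvKmers seq k step).foldl pvFitSeg d) PySem.Dict.empty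
  -- phase 2 (transform): pure lookups against the finished vocabulary
  (seq_list.map (fun seq => (pvKmers seq k step).map (fun seg => tok_dict.getD seg 0)), tok_dict.items)

-- ===== PRECONDITION & SPEC =====
-- Pre_ excludes exactly step = k - overlap ≤ 0, where the Python A raises ValueError.
def Pre_tokenize_sequences (seq_list : List String) (k : Int) (overlap : Int) : Prop := overlap < k
instance (seq_list : List String) (k : Int) (overlap : Int) : Decidable (Pre_tokenize_sequences seq_list k overlap) := by unfold Pre_tokenize_sequences; infer_instance
def pvWitness_tokenize_sequences : List String × Int × Int := (["ABAB", "BABA"], 2, 1)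

def Spec_tokenize_sequences (seq_list : List String) (k : Int) (overlap : Int) (out : List (List Int) × (List (String × Int))) : Prop := out = tokenize_sequences_alt seq_list k overlap
instance (seq_list : List String) (k : Int) (overlap : Int) (out : List (List Int) × (List (String × Int))) : Decidable (Spec_tokenize_sequences seq_list k overlap out) := by unfold Spec_tokenize_sequences; infer_instance

-- ===== CLAIM (what is proved, stated in full; the proofs are below) =====
def Claim_equal_tokenize_sequences : Prop := ∀ (seq_list : List String) (k : Int) (overlap : Int), Dom_tokenize_sequences seq_list k overlap → Pre_tokenize_sequences seq_list k overlap → Spec_tokenize_sequences seq_list k overlap (tokenize_sequences seq_list k overlap)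

-- ===== LEMMAS AND PROOFS =====

-- fit over a list of segments
def pvFit (d : PySem.Dict String Int) (l : List String) : PySem.Dict String Int := l.foldl pvFitSeg d

-- "d' extends d": every key present in d keeps its value
def pvExt (d d' : PySem.Dict String Int) : Prop :=
  ∀ s, d.contains s = true → d'.get? s = d.get? s

theorem pvExt_refl (d : PySem.Dict String Int) : pvExt d d := fun _ _ => rfl

theorem pvExt_trans {d₁ d₂ d₃ : PySem.Dict String Int} (h₁ : pvExt d₁ d₂) (h₂ : pvExt d₂ d₃) :
    pvExt d₁ d₃ := by
  intro s hs
  have h2 : d₂.contains s = true := by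
    rw [PySem.Dict.contains_eq_isSome_get?, h₁ s hs, ← PySem.Dict.contains_eq_isSome_get?]; exact hs
  rw [h₂ s h2, h₁ s hs]

theorem pvExt_fitSeg (d : PySem.Dict String Int) (seg : String) : pvExt d (pvFitSeg d seg) := by
  intro s hs
  unfold pvFitSeg
  by_cases h : d.contains seg = true
  · simp [h]
  · have hne : s ≠ seg := fun he => h (he ▸ hs)
    simp [h, PySem.Dict.get?_insert_of_ne d _ hne]

theorem pvExt_fit (d : PySem.Dict String Int) (l : List String) : pvExt d (pvFit d l) := by
  induction l generalizing d with
  | nil => exact pvExt_refl d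
  | cons a l ih => exact pvExt_trans (pvExt_fitSeg d a) (ih (pvFitSeg d a))

theorem pvExt_fitAll (d : PySem.Dict String Int) (seqs : List String) (k step : Int) :
    pvExt d (seqs.foldl (fun d seq => (pvKmers seq k step).foldl pvFitSeg d) d) := by
  induction seqs generalizing d with
  | nil => exact pvExt_refl d
  | cons a l ih => exact pvExt_trans (pvExt_fit d (pvKmers a k step)) (ih _)

theorem pvContains_fitSeg_self (d : PySem.Dict String Int) (seg : String) :
    (pvFitSeg d seg).contains seg = true := by
  unfold pvFitSeg
  by_cases h : d.contains seg = true
  · simp [h]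
  · simp [h, PySem.Dict.contains_insert_self]

-- A's inner loop, written over the segment list
theorem pvInner_eq (l : List String) (d : PySem.Dict String Int) (ts : List Int)
    (D : PySem.Dict String Int) (hD : pvExt (pvFit d l) D) :
    l.foldl (fun (st2 : PySem.Dict String Int × List Int) seg =>
        let d' := pvFitSeg st2.1 seg
        (d', st2.2 ++ [d'.getD seg 0])) (d, ts)
      = (pvFit d l, ts ++ l.map (fun seg => D.getD seg 0)) := by
  induction l generalizing d ts with
  | nil => simp [pvFit]
  | cons a l ih =>
    have hfit : pvFit d (a :: l) = pvFit (pvFitSeg d a) l := rfl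
    rw [hfit] at hD
    have hext : pvExt (pvFitSeg d a) D :=
      pvExt_trans (pvExt_fit (pvFitSeg d a) l) hD
    have hval : D.getD a 0 = (pvFitSeg d a).getD a 0 := by
      rw [PySem.Dict.getD_eq_get?_getD, PySem.Dict.getD_eq_get?_getD,
        hext a (pvContains_fitSeg_self d a)]
    simp only [List.foldl_cons]
    rw [ih (pvFitSeg d a) (ts ++ [(pvFitSeg d a).getD a 0]) hD]
    simp [hfit, hval]

-- A's outer loop, against the finished vocabulary D
theorem pvOuter_eq (seqs : List String) (k step : Int) (d : PySem.Dict String Int)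
    (tss : List (List Int)) (D : PySem.Dict String Int)
    (hD : pvExt (seqs.foldl (fun d seq => (pvKmers seq k step).foldl pvFitSeg d) d) D) :
    seqs.foldl
      (fun (st : PySem.Dict String Int × List (List Int)) seq =>
        let inner := (pvKmers seq k step).foldl
          (fun (st2 : PySem.Dict String Int × List Int) seg =>
            let d' := pvFitSeg st2.1 seg
            (d', st2.2 ++ [d'.getD seg 0])) (st.1, [])
        (inner.1, st.2 ++ [inner.2])) (d, tss)
      = (seqs.foldl (fun d seq => (pvKmers seq k step).foldl pvFitSeg d) d,
         tss ++ seqs.map (fun seq => (pvKmers seq k step).map (fun seg => D.getD seg 0))) := by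
  induction seqs generalizing d tss with
  | nil => simp
  | cons a l ih =>
    have hext : pvExt (pvFit d (pvKmers a k step))
        ((a :: l).foldl (fun d seq => (pvKmers seq k step).foldl pvFitSeg d) d) := by
      simpa using pvExt_fitAll (pvFit d (pvKmers a k step)) l k step
    simp only [List.foldl_cons]
    rw [pvInner_eq (pvKmers a k step) d [] D (pvExt_trans hext hD)]
    rw [ih (pvFit d (pvKmers a k step)) _ (by simpa using hD)]
    simp [pvFit]

-- ===== VERDICT (by name: the statement is the Claim_ definition above) =====
theorem tokenize_sequences_spec : Claim_equal_tokenize_sequences := by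
  intro seq_list k overlap _ _
  unfold Spec_tokenize_sequences tokenize_sequences tokenize_sequences_alt
  set step := k - overlap with hstep
  set D := seq_list.foldl
      (fun d seq => (pvKmers seq k step).foldl pvFitSeg d) PySem.Dict.empty with hDdef
  have hA : seq_list.foldl
      (fun (st : PySem.Dict String Int × List (List Int)) seq =>
        let inner := (PySem.List.pyRange 0 (PySem.Str.len seq - k + 1) step).foldl
          (fun (st2 : PySem.Dict String Int × List Int) i =>
            let seg := PySem.Str.slice seq (some i) (some (i + k))
            let d := if st2.1.contains seg then st2.1 else st2.1.insert seg ((st2.1.size : Int) + 1)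
            (d, st2.2 ++ [d.getD seg 0]))
          (st.1, [])
        (inner.1, st.2 ++ [inner.2])) (PySem.Dict.empty, [])
      = (D, [] ++ seq_list.map
          (fun seq => (pvKmers seq k step).map (fun seg => D.getD seg 0))) := by
    have hshape : ∀ (st : PySem.Dict String Int × List (List Int)) (seq : String),
        (PySem.List.pyRange 0 (PySem.Str.len seq - k + 1) step).foldl
          (fun (st2 : PySem.Dict String Int × List Int) i =>
            let seg := PySem.Str.slice seq (some i) (some (i + k))
            let d := if st2.1.contains seg then st2.1 else st2.1.insert seg ((st2.1.size : Int) + 1)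
            (d, st2.2 ++ [d.getD seg 0])) (st.1, [])
        = (pvKmers seq k step).foldl
          (fun (st2 : PySem.Dict String Int × List Int) seg =>
            let d' := pvFitSeg st2.1 seg
            (d', st2.2 ++ [d'.getD seg 0])) (st.1, []) := by
      intro st seq
      rw [pvKmers, List.foldl_map]
      rfl
    calc seq_list.foldl
          (fun (st : PySem.Dict String Int × List (List Int)) seq =>
            let inner := (PySem.List.pyRange 0 (PySem.Str.len seq - k + 1) step).foldl
              (fun (st2 : PySem.Dict String Int × List Int) i =>
                let seg := PySem.Str.slice seq (some i) (some (i + k))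
                let d := if st2.1.contains seg then st2.1 else st2.1.insert seg ((st2.1.size : Int) + 1)
                (d, st2.2 ++ [d.getD seg 0]))
              (st.1, [])
            (inner.1, st.2 ++ [inner.2])) (PySem.Dict.empty, [])
        = seq_list.foldl
          (fun (st : PySem.Dict String Int × List (List Int)) seq =>
            let inner := (pvKmers seq k step).foldl
              (fun (st2 : PySem.Dict String Int × List Int) seg =>
                let d' := pvFitSeg st2.1 seg
                (d', st2.2 ++ [d'.getD seg 0])) (st.1, [])
            (inner.1, st.2 ++ [inner.2])) (PySem.Dict.empty, []) := by
          apply PySem.List.foldl_congr_mem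
          intro st seq _
          simp only [hshape]
      _ = (D, [] ++ seq_list.map
            (fun seq => (pvKmers seq k step).map (fun seg => D.getD seg 0))) := by
          rw [pvOuter_eq seq_list k step PySem.Dict.empty [] D (pvExt_refl D)]
  simp only [hA]
  refine Prod.ext ?_ rfl
  simp
  exact fun _ _ _ _ => rfl
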